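-- pv_equiv track=rewrite | github.com/hector6371/deva | util.py | remove_candidate_from_col
-- ===== SOURCE A (Python) =====
-- def remove_candidate_from_col(candidate_board, candidates_values, col_no, exception_rows=None):
--     removed_something = False
--     if exception_rows is None:
--         exception_rows = set()
--
--     affected_col = [row[col_no] for row in candidate_board]
--     for row_no, cell in enumerate(affected_col):
--         if row_no not in exception_rows:
--             for candidate_value in candidates_values:
--                 try:
--                     cell.remove(candidate_value)
--                     removed_something = True
--                 except KeyError:
--                     pass
--     return removed_something
-- ===== SOURCE B (Python) =====
-- def remove_candidate_from_col(candidate_board, candidates_values, col_no, exception_rows=None):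
--     exc = exception_rows if exception_rows is not None else ()
--     cand = frozenset(candidates_values)
--     cells = [row[col_no] for row_no, row in enumerate(candidate_board)
--              if row_no not in exc]
--     before = sum(len(c) for c in cells)
--     for c in cells:
--         c -= cand
--     return sum(len(c) for c in cells) < before
-- ===== Notes on version B (the rewrite author's own statement) =====
-- stated objective: alternative
-- what changed: B drops the removed_something flag and the per-candidate try/except loop entirely: it collects the affected non-excluded cells, records the total number of candidates before, bulk-subtracts a frozenset of candidate values from every cell, and returns whether the total count shrank (size accounting instead of a per-removal boolean accumulator).
import Mathlib
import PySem

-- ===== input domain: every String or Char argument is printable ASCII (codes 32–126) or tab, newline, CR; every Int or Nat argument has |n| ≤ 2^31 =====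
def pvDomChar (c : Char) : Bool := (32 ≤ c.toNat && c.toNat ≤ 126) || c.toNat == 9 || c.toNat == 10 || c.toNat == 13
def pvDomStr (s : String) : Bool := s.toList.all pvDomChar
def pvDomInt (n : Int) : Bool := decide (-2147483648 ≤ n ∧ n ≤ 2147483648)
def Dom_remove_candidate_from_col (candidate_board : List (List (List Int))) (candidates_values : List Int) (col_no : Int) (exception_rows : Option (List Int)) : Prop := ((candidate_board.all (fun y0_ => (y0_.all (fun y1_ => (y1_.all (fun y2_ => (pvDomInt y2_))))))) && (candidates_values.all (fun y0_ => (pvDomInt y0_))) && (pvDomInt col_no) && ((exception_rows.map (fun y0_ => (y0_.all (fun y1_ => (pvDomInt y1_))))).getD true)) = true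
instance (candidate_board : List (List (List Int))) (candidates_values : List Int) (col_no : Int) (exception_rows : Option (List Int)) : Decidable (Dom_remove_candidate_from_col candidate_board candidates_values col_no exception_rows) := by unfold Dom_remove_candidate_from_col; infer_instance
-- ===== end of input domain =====

-- ===== PORT A =====
-- B replaces A's flag + per-candidate try/except remove loop by size accounting: total candidate
-- count before vs after one bulk set subtraction per affected cell (alternative decomposition).
-- Both A and B mutate the cell sets in place the same way; the equivalence proved here is about the RETURN value.
def remove_candidate_from_col (candidate_board : List (List (List Int))) (candidates_values : List Int) (col_no : Int) (exception_rows : Option (List Int)) : Bool :=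
  let exc : List Int := match exception_rows with | none => [] | some s => s
  match candidate_board.mapM (fun row => PySem.List.pyGet? row col_no) with
  | none => false  -- IndexError in the comprehension; excluded by Pre_
  | some affected_col =>
    (PySem.List.enumerate affected_col).foldl
      (fun removed rc =>
        if rc.1 ∈ exc then removed
        else (candidates_values.foldl
                (fun (st : List Int × Bool) cv =>
                  match PySem.Set.remove? st.1 cv with
                  | some c' => (c', true)   -- cell.remove(cv); removed_something = True
                  | none => st)             -- KeyError: pass
                (rc.2, removed)).2)
      false

-- ===== PORT B =====
-- Port of B (Source B). 'c -= cand' mutates the same cell sets A mutates; here the mutated cells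
-- are the 'cells2' list, and only the total-size comparison feeds the return value.
def remove_candidate_from_col_alt (candidate_board : List (List (List Int))) (candidates_values : List Int) (col_no : Int) (exception_rows : Option (List Int)) : Bool :=
  let exc : List Int := exception_rows.getD []
  let cand : PySem.Set Int := PySem.Set.ofList candidates_values
  match ((PySem.List.enumerate candidate_board).filter
           (fun rr => !(decide (rr.1 ∈ exc)))).mapM
          (fun rr => PySem.List.pyGet? rr.2 col_no) with
  | none => false  -- IndexError in the comprehension; excluded by Pre_
  | some cells =>
    let before := (cells.map List.length).sum
    let cells2 := cells.map (fun c => PySem.Set.diff c cand)  -- c -= cand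
    decide ((cells2.map List.length).sum < before)

-- ===== PRECONDITION & SPEC =====
-- Pre_ excludes exactly the inputs where Python A raises IndexError: col_no out of range for some row.
def Pre_remove_candidate_from_col (candidate_board : List (List (List Int))) (candidates_values : List Int) (col_no : Int) (exception_rows : Option (List Int)) : Prop :=
  ∀ row ∈ candidate_board, PySem.Raise.InRange row.length col_no
instance (candidate_board : List (List (List Int))) (candidates_values : List Int) (col_no : Int) (exception_rows : Option (List Int)) : Decidable (Pre_remove_candidate_from_col candidate_board candidates_values col_no exception_rows) := by unfold Pre_remove_candidate_from_col; infer_instance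
def pvWitness_remove_candidate_from_col : List (List (List Int)) × List Int × Int × Option (List Int) :=
  ([[[1, 2], [3]], [[2], [4]]], [2, 5], 0, some [1])
def Spec_remove_candidate_from_col (candidate_board : List (List (List Int))) (candidates_values : List Int) (col_no : Int) (exception_rows : Option (List Int)) (out : Bool) : Prop := out = remove_candidate_from_col_alt candidate_board candidates_values col_no exception_rows
instance (candidate_board : List (List (List Int))) (candidates_values : List Int) (col_no : Int) (exception_rows : Option (List Int)) (out : Bool) : Decidable (Spec_remove_candidate_from_col candidate_board candidates_values col_no exception_rows out) := by unfold Spec_remove_candidate_from_col; infer_instance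

-- ===== CLAIM (what is proved, stated in full; the proofs are below) =====
def Claim_equal_remove_candidate_from_col : Prop := ∀ (candidate_board : List (List (List Int))) (candidates_values : List Int) (col_no : Int) (exception_rows : Option (List Int)), Dom_remove_candidate_from_col candidate_board candidates_values col_no exception_rows → Pre_remove_candidate_from_col candidate_board candidates_values col_no exception_rows → Spec_remove_candidate_from_col candidate_board candidates_values col_no exception_rows (remove_candidate_from_col candidate_board candidates_values col_no exception_rows)

-- ===== LEMMAS AND PROOFS =====

-- A's inner candidate loop: the flag after the loop is the old flag or "some candidate is in the cell".
lemma inner_flag (cvs : List Int) : ∀ (c : List Int) (b : Bool),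
    (cvs.foldl
      (fun (st : List Int × Bool) cv =>
        match PySem.Set.remove? st.1 cv with
        | some c' => (c', true)
        | none => st)
      (c, b)).2 = (b || cvs.any (fun cv => c.contains cv)) := by
  induction cvs with
  | nil => intro c b; simp
  | cons cv rest ih =>
    intro c b
    by_cases h : cv ∈ c
    · have hrm : PySem.Set.remove? c cv = some (PySem.Set.discard c cv) := by
        simp [PySem.Set.remove?, PySem.Set.contains, h]
      simp only [List.foldl_cons, hrm, List.any_cons]
      rw [ih]
      simp [h]
    · have hrm : PySem.Set.remove? c cv = none := by
        simp [PySem.Set.remove?, PySem.Set.contains, h]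
      simp only [List.foldl_cons, hrm, List.any_cons]
      rw [ih]
      simp [h]

-- A's outer loop equals flag-or-any over the enumerated board rows.
lemma foldA_eq (cvs : List Int) (col_no : Int) (exc : List Int) :
    ∀ (cb : List (List (List Int))) (ac : List (List Int)) (s : Int) (b : Bool),
    cb.mapM (fun row => PySem.List.pyGet? row col_no) = some ac →
    (PySem.List.enumerate ac s).foldl
      (fun removed rc =>
        if rc.1 ∈ exc then removed
        else (cvs.foldl
                (fun (st : List Int × Bool) cv =>
                  match PySem.Set.remove? st.1 cv with
                  | some c' => (c', true)
                  | none => st)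
                (rc.2, removed)).2) b
    = (b || (PySem.List.enumerate cb s).any (fun rr =>
        !(decide (rr.1 ∈ exc)) && (match PySem.List.pyGet? rr.2 col_no with
          | some c => cvs.any (fun cv => c.contains cv)
          | none => false))) := by
  intro cb
  induction cb with
  | nil =>
    intro ac s b hac
    simp only [List.mapM_nil, Option.pure_def, Option.some.injEq] at hac
    subst hac
    simp [PySem.List.enumerate_nil]
  | cons row rest ih =>
    intro ac s b hac
    cases hcell : PySem.List.pyGet? row col_no with
    | none => simp [List.mapM_cons, hcell] at hac
    | some cell =>
      cases hrest : rest.mapM (fun row => PySem.List.pyGet? row col_no) with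
      | none => simp [List.mapM_cons, hcell, hrest] at hac
      | some ac2 =>
        simp only [List.mapM_cons, hcell, hrest] at hac
        simp at hac
        subst hac
        rw [PySem.List.enumerate_cons, PySem.List.enumerate_cons]
        simp only [List.foldl_cons, List.any_cons, hcell]
        by_cases hs : s ∈ exc
        · simp only [hs, if_true, decide_true, Bool.not_true, Bool.false_and,
            Bool.false_or]
          exact ih ac2 (s + 1) b hrest
        · simp only [hs, if_false, decide_false, Bool.not_false, Bool.true_and]
          rw [inner_flag]
          rw [ih ac2 (s + 1) _ hrest]
          rw [Bool.or_assoc]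

-- mapM of pyGet? succeeds when every listed element has col_no in range
lemma mapM_pairs_some (col_no : Int) :
    ∀ (l : List (Int × List (List Int))),
    (∀ rr ∈ l, PySem.Raise.InRange rr.2.length col_no) →
    ∃ cells, l.mapM (fun rr => PySem.List.pyGet? rr.2 col_no) = some cells := by
  intro l
  induction l with
  | nil => intro _; exact ⟨[], rfl⟩
  | cons rr rest ih =>
    intro h
    obtain ⟨cells, hcells⟩ := ih (fun r hr => h r (List.mem_cons_of_mem _ hr))
    have hr := h rr (by simp)
    cases hcell : PySem.List.pyGet? rr.2 col_no with
    | none => exact absurd hr ((PySem.List.pyGet?_eq_none_iff _ _).mp hcell)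
    | some cell =>
      refine ⟨cell :: cells, ?_⟩
      rw [List.mapM_cons]
      simp [hcell, hcells]

-- subtraction never grows a cell
lemma diff_len_le (cand c : List Int) : (PySem.Set.diff c cand).length ≤ c.length := by
  simp only [PySem.Set.diff]
  exact List.length_filter_le _ _

-- nor the total
lemma sum_after_le (cand : List Int) : ∀ (cells : List (List Int)),
    ((cells.map (fun c => PySem.Set.diff c cand)).map List.length).sum
      ≤ (cells.map List.length).sum := by
  intro cells
  induction cells with
  | nil => simp
  | cons c rest ih =>
    simp only [List.map_cons, List.sum_cons]
    exact Nat.add_le_add (diff_len_le cand c) ih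

-- a cell shrinks under subtraction iff it contains some candidate value
lemma hit_iff (cvs c : List Int) :
    ((PySem.Set.diff c (PySem.Set.ofList cvs)).length < c.length)
      ↔ (cvs.any (fun cv => c.contains cv) = true) := by
  simp only [PySem.Set.diff, List.length_filter_lt_length_iff_exists,
    Bool.not_eq_true', Bool.not_eq_false, PySem.Set.contains_iff,
    PySem.Set.mem_ofList, List.any_eq_true, List.contains_iff_mem]
  exact ⟨fun ⟨x, h1, h2⟩ => ⟨x, h2, h1⟩, fun ⟨x, h1, h2⟩ => ⟨x, h2, h1⟩⟩

-- B's size-accounting value equals the same any over the enumerated board rows.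
lemma valB_eq (cvs : List Int) (col_no : Int) (exc : List Int) :
    ∀ (cb : List (List (List Int))) (s : Int),
    (∀ row ∈ cb, PySem.Raise.InRange row.length col_no) →
    (match ((PySem.List.enumerate cb s).filter
             (fun rr => !(decide (rr.1 ∈ exc)))).mapM
            (fun rr => PySem.List.pyGet? rr.2 col_no) with
     | none => false
     | some cells =>
       decide (((cells.map (fun c => PySem.Set.diff c (PySem.Set.ofList cvs))).map List.length).sum
                 < (cells.map List.length).sum))
    = (PySem.List.enumerate cb s).any (fun rr =>
        !(decide (rr.1 ∈ exc)) && (match PySem.List.pyGet? rr.2 col_no with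
          | some c => cvs.any (fun cv => c.contains cv)
          | none => false)) := by
  intro cb
  induction cb with
  | nil => intro s _; simp [PySem.List.enumerate_nil]
  | cons row rest ih =>
    intro s hall
    have hrowmem : ∀ rr ∈ (PySem.List.enumerate rest (s + 1)).filter
        (fun rr => !(decide (rr.1 ∈ exc))), PySem.Raise.InRange rr.2.length col_no := by
      intro rr hrr
      have hmem := List.mem_of_mem_filter hrr
      rw [PySem.List.mem_enumerate_iff] at hmem
      obtain ⟨k, hk, hrr⟩ := hmem
      subst hrr
      exact hall _ (List.mem_cons_of_mem _ (List.getElem_mem hk))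
    obtain ⟨cellsR, hcellsR⟩ := mapM_pairs_some col_no _ hrowmem
    have hr := hall row (by simp)
    cases hcell : PySem.List.pyGet? row col_no with
    | none => exact absurd hr ((PySem.List.pyGet?_eq_none_iff _ _).mp hcell)
    | some cell =>
      rw [PySem.List.enumerate_cons]
      by_cases hs : s ∈ exc
      · rw [List.filter_cons_of_neg (by simp [hs])]
        simp only [List.any_cons, hs, decide_true, Bool.not_true, Bool.false_and,
          Bool.false_or]
        exact ih (s + 1) (fun r hr' => hall r (List.mem_cons_of_mem _ hr'))
      · rw [List.filter_cons_of_pos (by simp [hs])]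
        simp only [List.any_cons, hs, decide_false, Bool.not_false, Bool.true_and]
        have hmm : ((s, row) :: (PySem.List.enumerate rest (s + 1)).filter
              (fun rr => !(decide (rr.1 ∈ exc)))).mapM
            (fun rr => PySem.List.pyGet? rr.2 col_no) = some (cell :: cellsR) := by
          rw [List.mapM_cons]
          simp [hcell, hcellsR]
        rw [hmm]
        simp only [List.map_cons, List.sum_cons]
        have h1 := diff_len_le (PySem.Set.ofList cvs) cell
        have h2 := sum_after_le (PySem.Set.ofList cvs) cellsR
        have hsplit : ((PySem.Set.diff cell (PySem.Set.ofList cvs)).length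
              + ((cellsR.map (fun c => PySem.Set.diff c (PySem.Set.ofList cvs))).map List.length).sum
            < cell.length + (cellsR.map List.length).sum)
            ↔ ((PySem.Set.diff cell (PySem.Set.ofList cvs)).length < cell.length
               ∨ ((cellsR.map (fun c => PySem.Set.diff c (PySem.Set.ofList cvs))).map List.length).sum
                   < (cellsR.map List.length).sum) := by omega
        rw [decide_eq_decide.mpr hsplit, Bool.decide_or]
        have hrest := ih (s + 1) (fun r hr' => hall r (List.mem_cons_of_mem _ hr'))
        simp only [hcellsR] at hrest
        simp only [hcell]
        rw [hrest]
        congr 1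
        by_cases h : (PySem.Set.diff cell (PySem.Set.ofList cvs)).length < cell.length
        · exact (decide_eq_true h).trans ((hit_iff cvs cell).mp h).symm
        · rw [decide_eq_false h]
          cases hany : cvs.any (fun cv => cell.contains cv)
          · rfl
          · exact absurd ((hit_iff cvs cell).mpr hany) h

-- mapM over rows succeeds under Pre_
lemma mapM_some (col_no : Int) :
    ∀ (cb : List (List (List Int))),
    (∀ row ∈ cb, PySem.Raise.InRange row.length col_no) →
    ∃ ac, cb.mapM (fun row => PySem.List.pyGet? row col_no) = some ac := by
  intro cb
  induction cb with
  | nil => intro _; exact ⟨[], rfl⟩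
  | cons row rest ih =>
    intro h
    obtain ⟨ac, hac⟩ := ih (fun r hr => h r (List.mem_cons_of_mem _ hr))
    have hr := h row (by simp)
    cases hcell : PySem.List.pyGet? row col_no with
    | none => exact absurd hr ((PySem.List.pyGet?_eq_none_iff _ _).mp hcell)
    | some cell =>
      refine ⟨cell :: ac, ?_⟩
      rw [List.mapM_cons]
      simp [hcell, hac]

-- ===== VERDICT (by name: the statement is the Claim_ definition above) =====
theorem remove_candidate_from_col_spec : Claim_equal_remove_candidate_from_col := by
  intro cb cvs col exc _dom hpre
  unfold Spec_remove_candidate_from_col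
  obtain ⟨ac, hac⟩ := mapM_some col cb hpre
  cases exc with
  | none =>
    simp only [remove_candidate_from_col, remove_candidate_from_col_alt, hac,
      Option.getD_none]
    rw [foldA_eq cvs col [] cb ac 0 false hac, Bool.false_or,
      ← valB_eq cvs col [] cb 0 hpre]
    rfl
  | some l =>
    simp only [remove_candidate_from_col, remove_candidate_from_col_alt, hac,
      Option.getD_some]
    rw [foldA_eq cvs col l cb ac 0 false hac, Bool.false_or,
      ← valB_eq cvs col l cb 0 hpre]
    rfl
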